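-- pv_equiv track=rewrite | github.com/j4th/mtg-mcp-server | src/mtg_mcp_server/services/mtggoldfish.py | _parse_decklist
-- ===== SOURCE A (Python) =====
-- def _parse_decklist(text: str) -> tuple[list[str], list[str]]:
--     """Parse a plaintext decklist into mainboard and sideboard.
--
--     Lines are in format ``4 Card Name``. A blank line separates
--     mainboard from sideboard.
--     """
--     mainboard: list[str] = []
--     sideboard: list[str] = []
--     current = mainboard
--
--     for line in text.strip().splitlines():
--         stripped = line.strip()
--         if not stripped:
--             # Blank line switches to sideboard
--             current = sideboard
--             continue
--         current.append(stripped)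
--
--     return mainboard, sideboard
-- ===== SOURCE B (Python) =====
-- def _parse_decklist(text: str) -> tuple[list[str], list[str]]:
--     """Locate the first blank line, then partition: lines before it are the
--     mainboard, non-empty lines after it are the sideboard."""
--     lines = [line.strip() for line in text.strip().splitlines()]
--     if "" not in lines:
--         return lines, []
--     i = lines.index("")
--     return lines[:i], [l for l in lines[i + 1:] if l]
-- ===== Notes on version B (the rewrite author's own statement) =====
-- stated objective: simpler
-- what changed: Replaces A's stateful single pass with a toggling destination pointer by a boundary-locate-then-partition decomposition: strip lines once, find the index of the first blank line, slice the mainboard before it and filter non-empty lines after it.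
import Mathlib
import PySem

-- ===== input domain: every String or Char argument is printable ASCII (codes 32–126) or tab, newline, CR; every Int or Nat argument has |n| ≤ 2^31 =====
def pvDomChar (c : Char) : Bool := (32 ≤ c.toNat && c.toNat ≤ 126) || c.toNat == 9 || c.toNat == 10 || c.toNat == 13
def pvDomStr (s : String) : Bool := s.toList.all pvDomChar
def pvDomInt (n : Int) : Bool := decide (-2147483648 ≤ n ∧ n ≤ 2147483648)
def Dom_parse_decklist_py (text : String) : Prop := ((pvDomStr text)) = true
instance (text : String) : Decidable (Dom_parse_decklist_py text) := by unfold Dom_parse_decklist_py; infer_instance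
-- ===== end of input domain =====

-- B replaces A's stateful toggling pass by locate-the-first-blank-line then partition (simpler decomposition; same cost).

-- ===== PORT A =====
-- A's loop: 'current' is modelled by a Bool flag (false = mainboard, true = sideboard),
-- appending to whichever list the flag selects, exactly as A's aliasing does.
def pvLoopA : List String → List String → List String → Bool → List String × List String
  | [], m, s, _ => (m, s)
  | line :: rest, m, s, cur =>
    let stripped := PySem.Str.strip line
    if stripped = "" then pvLoopA rest m s true
    else if cur then pvLoopA rest m (s ++ [stripped]) true
    else pvLoopA rest (m ++ [stripped]) s false

def parse_decklist_py (text : String) : List String × List String :=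
  pvLoopA (PySem.Str.splitlines (PySem.Str.strip text)) [] [] false

-- ===== PORT B =====
def parse_decklist_py_alt (text : String) : List String × List String :=
  let lines := (PySem.Str.splitlines (PySem.Str.strip text)).map PySem.Str.strip
  match PySem.List.index? lines "" with
  | none => (lines, [])
  | some i => (lines.take i, ((lines.drop (i + 1)).filter (fun l => l != "")))

-- ===== PRECONDITION & SPEC =====
def Spec_parse_decklist_py (text : String) (out : List String × List String) : Prop := out = parse_decklist_py_alt text
instance (text : String) (out : List String × List String) : Decidable (Spec_parse_decklist_py text out) := by unfold Spec_parse_decklist_py; infer_instance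

-- ===== CLAIM (what is proved, stated in full; the proofs are below) =====
def Claim_equal_parse_decklist_py : Prop := ∀ (text : String), Dom_parse_decklist_py text → Spec_parse_decklist_py text (parse_decklist_py text)

-- ===== LEMMAS AND PROOFS =====

-- Once A is in sideboard mode it appends every non-blank stripped line.
theorem pvLoopA_side (xs : List String) (m s : List String) :
    pvLoopA xs m s true = (m, s ++ (xs.map PySem.Str.strip).filter (fun l => l != "")) := by
  induction xs generalizing s with
  | nil => simp [pvLoopA]
  | cons x rest ih =>
    simp only [pvLoopA, List.map_cons, List.filter_cons]
    by_cases h : PySem.Str.strip x = ""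
    · simp [h, ih]
    · simp [h, ih, List.append_assoc]

-- In mainboard mode, the result is determined by the position of the first blank stripped line.
theorem pvLoopA_main (xs : List String) (m s : List String) :
    pvLoopA xs m s false =
      match List.idxOf? "" (xs.map PySem.Str.strip) with
      | none => (m ++ xs.map PySem.Str.strip, s)
      | some i => (m ++ (xs.map PySem.Str.strip).take i,
                   s ++ ((xs.map PySem.Str.strip).drop (i + 1)).filter (fun l => l != "")) := by
  induction xs generalizing m with
  | nil => simp [pvLoopA]
  | cons x rest ih =>
    simp only [pvLoopA, List.map_cons, List.idxOf?_cons]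
    by_cases h : PySem.Str.strip x = ""
    · simp [h, pvLoopA_side]
    · cases hidx : List.idxOf? "" (rest.map PySem.Str.strip) with
      | none => simp [h, ih, hidx]
      | some i => simp [h, ih, hidx, List.append_assoc]

-- ===== VERDICT (by name: the statement is the Claim_ definition above) =====
theorem parse_decklist_py_spec : Claim_equal_parse_decklist_py := by
  intro text _
  unfold Spec_parse_decklist_py parse_decklist_py parse_decklist_py_alt
  rw [pvLoopA_main]
  simp only [PySem.List.index?_eq_idxOf?]
  cases hidx : List.idxOf? "" ((PySem.Str.splitlines (PySem.Str.strip text)).map PySem.Str.strip) <;> simp_all
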